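-- pv_equiv track=rewrite | github.com/ahmedEssyad/eter-rapports-journaliers | convert_to_latex.py | add_list_environments
-- ===== SOURCE A (Python) =====
-- def add_list_environments(content):
--     """
--     Ajoute les environnements de liste LaTeX
--     """
--     # Trouver les groupes d'items
--     lines = content.split('\n')
--     result = []
--     in_list = False
--
--     for line in lines:
--         if line.strip().startswith('\\item'):
--             if not in_list:
--                 result.append('\\begin{itemize}')
--                 in_list = True
--             result.append(line)
--         else:
--             if in_list:
--                 result.append('\\end{itemize}')
--                 in_list = False
--             result.append(line)
--
--     if in_list:
--         result.append('\\end{itemize}')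
--
--     return '\n'.join(result)
-- ===== SOURCE B (Python) =====
-- def add_list_environments(content):
--     """
--     Ajoute les environnements de liste LaTeX
--     """
--     # Partition lines into maximal runs of equal "is an \item line" key,
--     # then wrap each item run in an itemize environment.
--     runs = []
--     for line in content.split('\n'):
--         key = line.strip().startswith('\\item')
--         if runs and runs[-1][0] == key:
--             runs[-1][1].append(line)
--         else:
--             runs.append([key, [line]])
--     out = []
--     for key, group in runs:
--         if key:
--             out.append('\\begin{itemize}')
--             out.extend(group)
--             out.append('\\end{itemize}')
--         else:
--             out.extend(group)
--     return '\n'.join(out)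
-- ===== Notes on version B (the rewrite author's own statement) =====
-- stated objective: alternative
-- what changed: Replaces the in_list boolean state machine with a two-phase run-partitioning pass: lines are first grouped into maximal runs keyed by the \item predicate, then each item run is wrapped in an itemize environment, removing the mutable flag and the post-loop flush.
import Mathlib
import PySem

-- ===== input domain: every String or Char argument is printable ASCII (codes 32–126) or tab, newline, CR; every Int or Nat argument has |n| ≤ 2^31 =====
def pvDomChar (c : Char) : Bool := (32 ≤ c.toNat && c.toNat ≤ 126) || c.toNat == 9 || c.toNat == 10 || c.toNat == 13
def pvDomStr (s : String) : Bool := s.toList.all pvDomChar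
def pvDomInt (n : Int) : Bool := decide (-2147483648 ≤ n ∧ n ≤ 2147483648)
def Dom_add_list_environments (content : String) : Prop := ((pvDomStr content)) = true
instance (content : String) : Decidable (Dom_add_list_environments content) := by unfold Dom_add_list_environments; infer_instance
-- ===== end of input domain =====

-- ===== PORT A =====
-- B differs only in decomposition (run-partitioning vs state machine); return values proved equal on all of Dom.

-- line.strip().startswith('\item')
def pvIsItem (line : String) : Bool :=
  PySem.Str.startswith (PySem.Str.strip line) "\\item"

-- the body of A's for-loop: state = (result, in_list)
def pvAStep (s : List String × Bool) (line : String) : List String × Bool :=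
  if pvIsItem line then
    if !s.2 then (s.1 ++ ["\\begin{itemize}", line], true)
    else (s.1 ++ [line], true)
  else
    if s.2 then (s.1 ++ ["\\end{itemize}", line], false)
    else (s.1 ++ [line], false)

def add_list_environments (content : String) : String :=
  let lines := (PySem.Str.split? content "\n").getD []   -- sep is the literal "\n" ≠ "", so split? is some
  let s := lines.foldl pvAStep ([], false)
  let result := if s.2 then s.1 ++ ["\\end{itemize}"] else s.1
  PySem.Str.join "\n" result

-- ===== PORT B =====
-- first loop of B: extend the last run or start a new one (runs kept in reverse)
def pvRunStep (runs : List (Bool × List String)) (line : String) : List (Bool × List String) :=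
  let key := pvIsItem line
  match runs with
  | (k, g) :: rest => if k == key then (k, g ++ [line]) :: rest else (key, [line]) :: (k, g) :: rest
  | [] => [(key, [line])]

-- second loop of B: emit each run, wrapping item runs
def pvEmitStep (out : List String) (r : Bool × List String) : List String :=
  if r.1 then out ++ ["\\begin{itemize}"] ++ r.2 ++ ["\\end{itemize}"] else out ++ r.2

def add_list_environments_alt (content : String) : String :=
  let lines := (PySem.Str.split? content "\n").getD []
  let runs := (lines.foldl pvRunStep []).reverse
  PySem.Str.join "\n" (runs.foldl pvEmitStep [])

-- ===== PRECONDITION & SPEC =====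
def Spec_add_list_environments (content : String) (out : String) : Prop := out = add_list_environments_alt content
instance (content : String) (out : String) : Decidable (Spec_add_list_environments content out) := by unfold Spec_add_list_environments; infer_instance

-- ===== CLAIM (what is proved, stated in full; the proofs are below) =====
def Claim_equal_add_list_environments : Prop := ∀ (content : String), Dom_add_list_environments content → Spec_add_list_environments content (add_list_environments content)

-- ===== LEMMAS AND PROOFS =====

-- the output A produces from state in_list = b on the remaining lines (including the final flush)
def pvCont (b : Bool) : List String → List String
  | [] => if b then ["\\end{itemize}"] else []
  | l :: ls =>
    if pvIsItem l then
      if b then l :: pvCont true ls else "\\begin{itemize}" :: l :: pvCont true ls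
    else
      if b then "\\end{itemize}" :: l :: pvCont false ls else l :: pvCont false ls

-- A's fold from (acc, b), flushed, is acc ++ pvCont b ls
theorem pvA_foldl (ls : List String) (acc : List String) (b : Bool) :
    (if (ls.foldl pvAStep (acc, b)).2 then (ls.foldl pvAStep (acc, b)).1 ++ ["\\end{itemize}"]
     else (ls.foldl pvAStep (acc, b)).1) = acc ++ pvCont b ls := by
  induction ls generalizing acc b with
  | nil => cases b <;> simp [pvCont]
  | cons l ls ih =>
    simp only [List.foldl_cons, pvAStep, pvCont]
    cases hl : pvIsItem l <;> cases b <;> simp [ih]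

theorem pvEmit_foldl (rs : List (Bool × List String)) (acc : List String) :
    rs.foldl pvEmitStep acc = acc ++ rs.foldl pvEmitStep [] := by
  induction rs generalizing acc with
  | nil => simp
  | cons r rs ih =>
    simp only [List.foldl_cons]
    rw [ih, ih (pvEmitStep [] r)]
    simp [pvEmitStep]
    split <;> simp

-- the fold of pvRunStep keeps everything below the current top run fixed
theorem pvRun_foldl_rest (ls : List String) (k : Bool) (g : List String) (rest : List (Bool × List String)) :
    ls.foldl pvRunStep ((k, g) :: rest) = ls.foldl pvRunStep [(k, g)] ++ rest := by
  induction ls generalizing k g rest with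
  | nil => simp
  | cons l ls ih =>
    simp only [List.foldl_cons, pvRunStep]
    by_cases h : k == pvIsItem l
    · simp only [h, if_true]
      exact ih _ _ _
    · simp only [h, if_false, Bool.false_eq_true]
      rw [ih (pvIsItem l) [l] ((k, g) :: rest), ih (pvIsItem l) [l] [(k, g)]]
      simp

-- B's folds, started inside a run (k, g), emit the opened run then behave like A from state k
theorem pvB_run (ls : List String) (k : Bool) (g : List String) :
    ((ls.foldl pvRunStep [(k, g)]).reverse).foldl pvEmitStep []
      = (if k then "\\begin{itemize}" :: g else g) ++ pvCont k ls := by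
  induction ls generalizing k g with
  | nil =>
    cases k <;> simp [pvEmitStep, pvCont]
  | cons l ls ih =>
    simp only [List.foldl_cons, pvRunStep]
    by_cases h : k == pvIsItem l
    · have hk : pvIsItem l = k := (beq_iff_eq.mp h).symm
      simp only [h, if_true]
      rw [ih k (g ++ [l])]
      simp only [pvCont, hk]
      cases k <;> simp
    · have hk : pvIsItem l ≠ k := fun he => h (beq_iff_eq.mpr he.symm)
      simp only [h, if_false, Bool.false_eq_true]
      rw [pvRun_foldl_rest, List.reverse_append, List.foldl_append,
        pvEmit_foldl ((List.foldl pvRunStep [(pvIsItem l, [l])] ls).reverse), ih (pvIsItem l) [l]]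
      simp only [pvCont]
      cases hl : pvIsItem l <;> cases k <;> simp_all [pvEmitStep]

-- B's output list equals pvCont false
theorem pvB_eq_cont (ls : List String) :
    ((ls.foldl pvRunStep []).reverse).foldl pvEmitStep [] = pvCont false ls := by
  cases ls with
  | nil => simp [pvCont]
  | cons l ls =>
    simp only [List.foldl_cons, pvRunStep]
    rw [pvB_run]
    simp only [pvCont]
    cases hl : pvIsItem l <;> simp

-- ===== VERDICT (by name: the statement is the Claim_ definition above) =====
theorem add_list_environments_spec : Claim_equal_add_list_environments := by
  intro content _
  unfold Spec_add_list_environments add_list_environments add_list_environments_alt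
  simp only []
  rw [pvA_foldl, pvB_eq_cont]
  simp
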